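-- pv_equiv track=rewrite | github.com/HuinaLi/Ascon-collision-search | code/diff_ddt_suit.py | generatePairsWithDifference
-- ===== SOURCE A (Python) =====
-- def generatePairsWithDifference(diff, len_of_Sbox):
--     result = []
--     for x in range(len_of_Sbox):
--         for y in range(len_of_Sbox):
--             if x ^ y == diff:
--                result.append((x, y))
--                break
--     return result
-- ===== SOURCE B (Python) =====
-- def generatePairsWithDifference(diff, len_of_Sbox):
--     # One pass: the unique y with x ^ y == diff is x ^ diff; keep it if in range.
--     return [(x, x ^ diff) for x in range(len_of_Sbox) if 0 <= x ^ diff < len_of_Sbox]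
-- ===== Notes on version B (the rewrite author's own statement) =====
-- stated objective: faster
-- what changed: Replaced the nested scan over all y by directly computing y = x ^ diff and a range check, one pass over x.
import Mathlib
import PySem

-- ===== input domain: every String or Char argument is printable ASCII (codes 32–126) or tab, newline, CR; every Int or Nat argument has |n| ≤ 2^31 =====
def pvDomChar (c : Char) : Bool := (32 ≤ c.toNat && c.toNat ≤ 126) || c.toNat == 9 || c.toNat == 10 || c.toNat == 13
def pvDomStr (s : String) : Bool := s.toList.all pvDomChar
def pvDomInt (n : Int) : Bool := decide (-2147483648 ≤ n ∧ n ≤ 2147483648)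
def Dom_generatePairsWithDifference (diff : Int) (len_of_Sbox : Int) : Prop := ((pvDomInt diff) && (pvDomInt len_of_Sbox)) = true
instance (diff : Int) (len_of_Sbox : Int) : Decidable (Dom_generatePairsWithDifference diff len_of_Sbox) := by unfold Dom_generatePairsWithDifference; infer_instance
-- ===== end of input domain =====

-- B replaces A's inner scan over all y by directly computing y = x ^ diff with a range check (one pass).
-- ===== PORT A =====
-- inner loop over ys: append first y with x ^ y == diff, then break
def pvInnerA (diff x : Int) : List Int → List (Int × Int) → List (Int × Int)
  | [], acc => acc
  | y :: ys, acc => if PySem.Int.bxor x y = diff then acc ++ [(x, y)] else pvInnerA diff x ys acc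

def generatePairsWithDifference (diff : Int) (len_of_Sbox : Int) : List (Int × Int) :=
  (PySem.List.pyRange 0 len_of_Sbox 1).foldl
    (fun acc x => pvInnerA diff x (PySem.List.pyRange 0 len_of_Sbox 1) acc) []

-- ===== PORT B =====
def generatePairsWithDifference_alt (diff : Int) (len_of_Sbox : Int) : List (Int × Int) :=
  ((PySem.List.pyRange 0 len_of_Sbox 1).filter
      (fun x => decide (0 ≤ PySem.Int.bxor x diff) && decide (PySem.Int.bxor x diff < len_of_Sbox))).map
    (fun x => (x, PySem.Int.bxor x diff))

-- ===== PRECONDITION & SPEC =====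
def Spec_generatePairsWithDifference (diff : Int) (len_of_Sbox : Int) (out : List (Int × Int)) : Prop := out = generatePairsWithDifference_alt diff len_of_Sbox
instance (diff : Int) (len_of_Sbox : Int) (out : List (Int × Int)) : Decidable (Spec_generatePairsWithDifference diff len_of_Sbox out) := by unfold Spec_generatePairsWithDifference; infer_instance

-- ===== CLAIM (what is proved, stated in full; the proofs are below) =====
def Claim_equal_generatePairsWithDifference : Prop := ∀ (diff : Int) (len_of_Sbox : Int), Dom_generatePairsWithDifference diff len_of_Sbox → Spec_generatePairsWithDifference diff len_of_Sbox (generatePairsWithDifference diff len_of_Sbox)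

-- ===== LEMMAS AND PROOFS =====

theorem bxor_bxor_cancel (a b : Int) : PySem.Int.bxor a (PySem.Int.bxor a b) = b := by
  unfold PySem.Int.bxor
  by_cases ha : 0 ≤ a <;> by_cases hb : 0 ≤ b
  · have h1 : (0:Int) ≤ ((a.toNat ^^^ b.toNat : Nat) : Int) := Int.natCast_nonneg _
    simp only [ha, hb, if_pos, h1, Int.toNat_natCast, Nat.xor_xor_cancel_left]
    omega
  · have harg : ¬ (0:Int) ≤ -((a.toNat ^^^ (-b-1).toNat : Nat) : Int) - 1 := by omega
    simp only [ha, hb, if_pos, harg, ite_false]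
    have : (-(-((a.toNat ^^^ (-b-1).toNat : Nat) : Int) - 1) - 1) = ((a.toNat ^^^ (-b-1).toNat : Nat) : Int) := by ring
    rw [this, Int.toNat_natCast, Nat.xor_xor_cancel_left]
    omega
  · have harg : ¬ (0:Int) ≤ -(((-a-1).toNat ^^^ b.toNat : Nat) : Int) - 1 := by omega
    simp only [ha, hb, if_pos, harg, ite_false]
    have : (-(-(((-a-1).toNat ^^^ b.toNat : Nat) : Int) - 1) - 1) = (((-a-1).toNat ^^^ b.toNat : Nat) : Int) := by ring
    rw [this, Int.toNat_natCast, Nat.xor_xor_cancel_left]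
    omega
  · have harg : (0:Int) ≤ (((-a-1).toNat ^^^ (-b-1).toNat : Nat) : Int) := Int.natCast_nonneg _
    simp only [ha, hb, if_pos, harg, ite_false]
    rw [Int.toNat_natCast, Nat.xor_xor_cancel_left]
    omega

theorem bxor_eq_iff (x y diff : Int) : PySem.Int.bxor x y = diff ↔ y = PySem.Int.bxor x diff := by
  constructor
  · intro h; rw [← h, bxor_bxor_cancel]
  · intro h; rw [h, bxor_bxor_cancel]

-- A's inner loop appends (x, x ^ diff) exactly when x ^ diff occurs in the scanned list.
theorem pvInnerA_eq (diff x : Int) (L : List Int) (acc : List (Int × Int)) :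
    pvInnerA diff x L acc =
      if PySem.Int.bxor x diff ∈ L then acc ++ [(x, PySem.Int.bxor x diff)] else acc := by
  induction L with
  | nil => simp [pvInnerA]
  | cons y ys ih =>
    by_cases h : PySem.Int.bxor x y = diff
    · have hy : y = PySem.Int.bxor x diff := (bxor_eq_iff x y diff).1 h
      simp [pvInnerA, h, ← hy]
    · have hy : ¬ (PySem.Int.bxor x diff = y) := by
        intro e; exact h ((bxor_eq_iff x y diff).2 e.symm)
      simp [pvInnerA, h, ih, hy]

theorem foldl_append_filter_map (P : Int → Prop) [DecidablePred P] (g : Int → Int)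
    (q : Int → Bool) (hq : ∀ x, q x = true ↔ P x)
    (L : List Int) (acc : List (Int × Int)) :
    L.foldl (fun acc x => if P x then acc ++ [(x, g x)] else acc) acc =
      acc ++ (L.filter q).map (fun x => (x, g x)) := by
  induction L generalizing acc with
  | nil => simp
  | cons z zs ih =>
    simp only [List.foldl_cons, List.filter_cons]
    by_cases h : P z
    · rw [if_pos h, ih, if_pos ((hq z).2 h)]; simp
    · rw [if_neg h, ih, if_neg (fun hz => h ((hq z).1 hz))]

theorem generatePairsWithDifference_eq_alt (diff len_of_Sbox : Int) :
    generatePairsWithDifference diff len_of_Sbox = generatePairsWithDifference_alt diff len_of_Sbox := by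
  unfold generatePairsWithDifference generatePairsWithDifference_alt
  have step : ∀ (acc : List (Int × Int)) (x : Int),
      pvInnerA diff x (PySem.List.pyRange 0 len_of_Sbox 1) acc =
        if 0 ≤ PySem.Int.bxor x diff ∧ PySem.Int.bxor x diff < len_of_Sbox
        then acc ++ [(x, PySem.Int.bxor x diff)] else acc := by
    intro acc x
    rw [pvInnerA_eq]
    congr 1
    simp [PySem.List.mem_pyRange_one]
  calc (PySem.List.pyRange 0 len_of_Sbox 1).foldl
        (fun acc x => pvInnerA diff x (PySem.List.pyRange 0 len_of_Sbox 1) acc) []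
      = (PySem.List.pyRange 0 len_of_Sbox 1).foldl
        (fun acc x => if 0 ≤ PySem.Int.bxor x diff ∧ PySem.Int.bxor x diff < len_of_Sbox
          then acc ++ [(x, PySem.Int.bxor x diff)] else acc) [] := by
        apply PySem.List.foldl_congr_mem
        intro acc x _
        exact step acc x
    _ = _ := by
        rw [foldl_append_filter_map
          (fun x => 0 ≤ PySem.Int.bxor x diff ∧ PySem.Int.bxor x diff < len_of_Sbox)
          (fun x => PySem.Int.bxor x diff)
          (fun x => decide (0 ≤ PySem.Int.bxor x diff) && decide (PySem.Int.bxor x diff < len_of_Sbox))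
          (by intro x; simp)]
        simp

-- ===== VERDICT (by name: the statement is the Claim_ definition above) =====
theorem generatePairsWithDifference_spec : Claim_equal_generatePairsWithDifference := by
  intro diff len_of_Sbox _
  exact generatePairsWithDifference_eq_alt diff len_of_Sbox
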